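-- pv_equiv track=rewrite | github.com/TedBarbier/CryptInsa | backend/Crypto/dict_search.py | generer_pattern
-- ===== SOURCE A (Python) =====
-- def generer_pattern(mot):
--     mapping = {}
--     compteur = 1
--     pattern = []
--     for lettre in mot:
--         if lettre not in mapping:
--             mapping[lettre] = compteur
--             compteur += 1
--         pattern.append(mapping[lettre])
--     return tuple(pattern)
-- ===== SOURCE B (Python) =====
-- def generer_pattern(mot):
--     # rank of a letter = 1 + number of distinct letters strictly before its first occurrence
--     return tuple(1 + len(set(mot[:mot.index(c)])) for c in mot)
-- ===== Notes on version B (the rewrite author's own statement) =====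
-- stated objective: alternative
-- what changed: Replaces A's stateful single pass (dict + running counter) with a stateless per-letter formula: each letter's code is 1 + the number of distinct letters in the prefix before its first occurrence, computed with index/slice/set and no dict; trades A's O(n) for O(n^2).
import Mathlib
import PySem

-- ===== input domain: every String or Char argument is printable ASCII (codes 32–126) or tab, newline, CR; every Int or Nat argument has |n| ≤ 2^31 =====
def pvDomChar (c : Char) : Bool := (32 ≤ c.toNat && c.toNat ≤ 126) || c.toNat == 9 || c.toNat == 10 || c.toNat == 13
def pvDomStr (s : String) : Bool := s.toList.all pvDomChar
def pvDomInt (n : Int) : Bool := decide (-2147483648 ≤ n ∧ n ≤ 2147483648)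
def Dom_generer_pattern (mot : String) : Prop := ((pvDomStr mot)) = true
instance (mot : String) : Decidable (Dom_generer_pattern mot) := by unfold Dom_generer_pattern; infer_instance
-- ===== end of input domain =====

-- B drops A's dict+counter state machine entirely: each letter's rank is computed directly as
-- 1 + the number of distinct letters strictly before its first occurrence (alternative; O(n^2) vs A's O(n)).

-- ===== PORT A =====
-- loop: for lettre in mot: if lettre not in mapping: mapping[lettre]=compteur; compteur+=1; pattern.append(mapping[lettre])
-- mapping[lettre] is always present at the append; '.getD 0' only totalises the lookup.
def pvLoopA : List Char → PySem.Dict Char Int → Int → List Int → List Int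
  | [], _, _, pattern => pattern
  | lettre :: rest, mapping, compteur, pattern =>
    if mapping.contains lettre then
      pvLoopA rest mapping compteur (pattern ++ [(mapping.get? lettre).getD 0])
    else
      let mapping' := mapping.insert lettre compteur
      pvLoopA rest mapping' (compteur + 1) (pattern ++ [(mapping'.get? lettre).getD 0])

def generer_pattern (mot : String) : List Int :=
  pvLoopA mot.toList PySem.Dict.empty 1 []

-- ===== PORT B =====
-- tuple(1 + len(set(mot[:mot.index(c)])) for c in mot)
-- c occurs in mot, so mot.index(c) never raises; '.getD 0' only totalises that lookup.
-- mot[:k] at a nonnegative in-range k is List.take k on the characters.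
def generer_pattern_alt (mot : String) : List Int :=
  let l := mot.toList
  l.map (fun c =>
    1 + (((PySem.Set.ofList (l.take ((PySem.List.index? l c).getD 0))).length : Int)))

-- ===== PRECONDITION & SPEC =====
def Spec_generer_pattern (mot : String) (out : List Int) : Prop := out = generer_pattern_alt mot
instance (mot : String) (out : List Int) : Decidable (Spec_generer_pattern mot out) := by unfold Spec_generer_pattern; infer_instance

-- ===== CLAIM (what is proved, stated in full; the proofs are below) =====
def Claim_equal_generer_pattern : Prop := ∀ (mot : String), Dom_generer_pattern mot → Spec_generer_pattern mot (generer_pattern mot)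

-- ===== LEMMAS AND PROOFS =====

-- A's mapping after the distinct prefix S has been seen
def pvDictOf (S : List Char) : PySem.Dict Char Int :=
  (PySem.List.enumerate S).foldl (fun d p => d.insert p.2 (p.1 + 1)) PySem.Dict.empty

theorem pvDictOf_append_singleton (S : List Char) (c : Char) :
    pvDictOf (S ++ [c]) = (pvDictOf S).insert c ((S.length : Int) + 1) := by
  simp [pvDictOf, PySem.List.enumerate_append, PySem.List.enumerate]

theorem pvDictOf_get? (S : List Char) (hS : S.Nodup) (c : Char) :
    (pvDictOf S).get? c = Option.map (fun k : Nat => (k : Int) + 1) (PySem.List.index? S c) := by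
  induction S using List.reverseRecOn with
  | nil => rfl
  | append_singleton S c' ih =>
    have hS' : S.Nodup := (List.nodup_append.mp hS).1
    have hc' : c' ∉ S := by
      intro hmem
      exact (List.nodup_append.mp hS).2.2 c' hmem c' (List.mem_singleton.mpr rfl) rfl
    rw [pvDictOf_append_singleton]
    by_cases hcc : c = c'
    · subst hcc
      rw [PySem.Dict.get?_insert_self, PySem.List.index?_append_singleton_self S c hc']
      rfl
    · rw [PySem.Dict.get?_insert_of_ne _ _ hcc, ih hS']
      by_cases hmem : c ∈ S
      · rw [PySem.List.index?_append_of_mem _ hmem]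
      · have h1 : PySem.List.index? S c = none :=
          (PySem.List.index?_eq_none_iff S c).mpr hmem
        have h2 : PySem.List.index? (S ++ [c']) c = none := by
          refine (PySem.List.index?_eq_none_iff _ c).mpr ?_
          simp [hmem, hcc]
        rw [h1, h2]

-- Set.update only appends: S is a prefix of update S l
theorem pvUpdate_prefix (l S : List Char) : ∃ t, PySem.Set.update S l = S ++ t := by
  induction l generalizing S with
  | nil => exact ⟨[], by simp [PySem.Set.update]⟩
  | cons c t ih =>
    have hstep : PySem.Set.update S (c :: t) = PySem.Set.update (PySem.Set.add S c) t := by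
      simp [PySem.Set.update]
    by_cases hc : c ∈ S
    · have : PySem.Set.add S c = S := by
        simp [PySem.Set.add, PySem.Set.contains, hc]
      rw [hstep, this]; exact ih S
    · have : PySem.Set.add S c = S ++ [c] := by
        simp [PySem.Set.add, PySem.Set.contains]
        exact hc
      rw [hstep, this]
      obtain ⟨t', ht'⟩ := ih (S ++ [c])
      exact ⟨[c] ++ t', by simp [ht']⟩

-- A-side invariant: the loop with state built from seen-distinct list S
theorem pvLoopA_eq (l : List Char) : ∀ (S : List Char) (pat : List Int), S.Nodup →
    pvLoopA l (pvDictOf S) ((S.length : Int) + 1) pat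
      = pat ++ l.map (fun c =>
          (Option.map (fun k : Nat => (k : Int) + 1) (PySem.List.index? (PySem.Set.update S l) c)).getD 0) := by
  induction l with
  | nil => intro S pat _; simp [pvLoopA, PySem.Set.update]
  | cons c t ih =>
    intro S pat hS
    have hupd : PySem.Set.update S (c :: t) = PySem.Set.update (PySem.Set.add S c) t := by
      simp [PySem.Set.update]
    by_cases hc : c ∈ S
    · have hcont : (pvDictOf S).contains c = true := by
        rw [PySem.Dict.contains_eq_isSome_get?, pvDictOf_get? S hS c, Option.isSome_map]
        exact (PySem.List.index?_isSome_iff S c).mpr hc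
      have hadd : PySem.Set.add S c = S := by
        simp [PySem.Set.add, PySem.Set.contains, hc]
      obtain ⟨t', ht'⟩ := pvUpdate_prefix t S
      rw [pvLoopA, if_pos hcont, ih S _ hS]
      rw [List.map_cons, hupd, hadd, ht', PySem.List.index?_append_of_mem _ hc,
        pvDictOf_get? S hS c]
      simp
    · have hcont : (pvDictOf S).contains c = false := by
        rw [PySem.Dict.contains_eq_isSome_get?, pvDictOf_get? S hS c,
          (PySem.List.index?_eq_none_iff S c).mpr hc]
        rfl
      have hadd : PySem.Set.add S c = S ++ [c] := by
        simp [PySem.Set.add, PySem.Set.contains]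
        exact hc
      have hnodup : (S ++ [c]).Nodup := by
        simp [List.nodup_append, hS]
        intro a ha h
        exact hc (h ▸ ha)
      rw [pvLoopA, if_neg (by simp [hcont])]
      have hins : (pvDictOf S).insert c ((S.length : Int) + 1) = pvDictOf (S ++ [c]) :=
        (pvDictOf_append_singleton S c).symm
      rw [hins]
      have hlen : ((S.length : Int) + 1) + 1 = (((S ++ [c]).length : Int) + 1) := by
        simp
      rw [hlen, ih (S ++ [c]) _ hnodup]
      obtain ⟨t', ht'⟩ := pvUpdate_prefix t (S ++ [c])
      rw [List.map_cons, hupd, hadd, ht',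
        PySem.List.index?_append_of_mem _ (by simp : c ∈ S ++ [c]),
        PySem.List.index?_append_singleton_self S c hc,
        pvDictOf_get? (S ++ [c]) hnodup c,
        PySem.List.index?_append_singleton_self S c hc]
      simp

-- B-side key lemma: the first-occurrence rank of c among the distinct letters seen so far
-- equals the number of distinct letters in the prefix before c's first occurrence.
theorem pvIndex_update_eq (l : List Char) : ∀ (S : List Char) (c : Char), c ∉ S → c ∈ l →
    PySem.List.index? (PySem.Set.update S l) c
      = some ((PySem.Set.update S (l.take ((PySem.List.index? l c).getD 0))).length) := by
  induction l with
  | nil => intro S c _ hc; cases hc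
  | cons a t ih =>
    intro S c hcS hcl
    have hupd : ∀ (r : List Char), PySem.Set.update S (a :: r) = PySem.Set.update (PySem.Set.add S a) r := by
      intro r; simp [PySem.Set.update]
    by_cases hca : c = a
    · subst hca
      have hadd : PySem.Set.add S c = S ++ [c] := by
        simp [PySem.Set.add, PySem.Set.contains]
        exact hcS
      have hidx : (PySem.List.index? (c :: t) c).getD 0 = 0 := by
        rw [PySem.List.index?_cons_self]; rfl
      rw [hidx]
      obtain ⟨t', ht'⟩ := pvUpdate_prefix t (S ++ [c])
      rw [List.take_zero, hupd, hadd, ht',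
        PySem.List.index?_append_of_mem _ (by simp : c ∈ S ++ [c]),
        PySem.List.index?_append_singleton_self S c hcS]
      simp [PySem.Set.update]
    · have hct : c ∈ t := by
        cases hcl with
        | head => exact absurd rfl hca
        | tail _ h => exact h
      have hcS' : c ∉ PySem.Set.add S a := by
        intro h
        rcases (PySem.Set.mem_add S a c).mp h with h' | h'
        · exact hcS h'
        · exact hca h'
      obtain ⟨k', hk'⟩ := Option.isSome_iff_exists.mp
        ((PySem.List.index?_isSome_iff t c).mpr hct)
      have hidx : (PySem.List.index? (a :: t) c).getD 0 = k' + 1 := by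
        rw [PySem.List.index?_cons_of_ne t (Ne.symm hca), hk']; rfl
      rw [hidx, List.take_succ_cons, hupd, hupd, ih (PySem.Set.add S a) c hcS' hct, hk']
      rfl

-- ===== VERDICT (by name: the statement is the Claim_ definition above) =====
theorem generer_pattern_spec : Claim_equal_generer_pattern := by
  intro mot _
  unfold Spec_generer_pattern
  have hA : generer_pattern mot
      = pvLoopA mot.toList (pvDictOf []) ((([] : List Char).length : Int) + 1) [] := by
    simp [generer_pattern, pvDictOf, PySem.List.enumerate]
  rw [hA, pvLoopA_eq mot.toList [] [] List.nodup_nil, List.nil_append]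
  unfold generer_pattern_alt
  apply List.map_congr_left
  intro c hc
  rw [pvIndex_update_eq mot.toList [] c (List.not_mem_nil) hc]
  have hofList : ∀ (p : List Char), PySem.Set.update ([] : List Char) p = PySem.Set.ofList p := by
    intro p; rw [PySem.Set.ofList_eq_foldl]; rfl
  rw [hofList]
  simp
  ring
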